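-- pv_equiv track=rewrite | github.com/mihiarc/socialmapper | socialmapper/census/services/census_service.py | _group_geoids_by_state_and_county
-- ===== SOURCE A (Python) =====
-- from typing import Any, Dict, List, Optional, Tuple
--
-- def _group_geoids_by_state_and_county(geoids: List[str]) -> Dict[Tuple[str, str], List[str]]:
--     """Group GEOIDs by state and county for more specific API calls."""
--     state_county_groups = {}
--
--     for geoid in geoids:
--         if len(geoid) >= 5:  # Need at least state (2) + county (3) digits
--             state_fips = geoid[:2]
--             county_fips = geoid[2:5]
--             key = (state_fips, county_fips)
--             if key not in state_county_groups:
--                 state_county_groups[key] = []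
--             state_county_groups[key].append(geoid)
--
--     return state_county_groups
-- ===== SOURCE B (Python) =====
-- def _group_geoids_by_state_and_county(geoids):
--     """Group GEOIDs by state and county: distinct keys first, then one filter pass per key."""
--     valid = [g for g in geoids if len(g) >= 5]
--     keys = dict.fromkeys((g[:2], g[2:5]) for g in valid)
--     return {k: [g for g in valid if (g[:2], g[2:5]) == k] for k in keys}
-- ===== Notes on version B (the rewrite author's own statement) =====
-- stated objective: alternative
-- what changed: A builds buckets incrementally in one pass with a dict of lists; B first collects the distinct (state, county) keys in first-occurrence order via dict.fromkeys and then builds each group by a separate filter pass over the length-filtered list.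
import Mathlib
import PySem

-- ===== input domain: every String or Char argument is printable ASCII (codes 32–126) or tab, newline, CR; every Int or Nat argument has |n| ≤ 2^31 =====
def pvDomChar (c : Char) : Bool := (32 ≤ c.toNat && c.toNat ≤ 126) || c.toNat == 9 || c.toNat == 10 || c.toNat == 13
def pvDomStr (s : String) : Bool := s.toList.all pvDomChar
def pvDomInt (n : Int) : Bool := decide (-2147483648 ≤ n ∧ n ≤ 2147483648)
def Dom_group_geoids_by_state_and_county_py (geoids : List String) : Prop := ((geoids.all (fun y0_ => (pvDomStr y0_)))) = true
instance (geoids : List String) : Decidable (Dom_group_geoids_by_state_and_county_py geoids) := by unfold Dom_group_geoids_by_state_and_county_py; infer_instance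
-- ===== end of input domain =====

-- B groups by collecting the distinct (state, county) keys first and then building each group by a
-- separate filter pass, instead of A's incremental dict-of-buckets single pass (alternative decomposition).

-- ===== PORT A =====
-- A builds a dict keyed by (geoid[:2], geoid[2:5]), creating an empty bucket on first sight and appending.
def group_geoids_by_state_and_county_py (geoids : List String) : List (String × String × List String) :=
  let state_county_groups := geoids.foldl (fun d geoid =>
    if 5 ≤ PySem.Str.len geoid then
      let state_fips := PySem.Str.slice geoid none (some 2)
      let county_fips := PySem.Str.slice geoid (some 2) (some 5)
      let key := (state_fips, county_fips)
      let d := if d.contains key then d else d.insert key ([] : List String)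
      d.modify key [] (fun v => v ++ [geoid])
    else d) (PySem.Dict.empty : PySem.Dict (String × String) (List String))
  -- the dict with tuple keys, flattened into the required triple shape
  state_county_groups.items.map (fun p => (p.1.1, p.1.2, p.2))

-- ===== PORT B =====
-- the key expression (g[:2], g[2:5]) that Source B repeats inline
def pvKey (g : String) : String × String :=
  (PySem.Str.slice g none (some 2), PySem.Str.slice g (some 2) (some 5))

def group_geoids_by_state_and_county_py_alt (geoids : List String) : List (String × String × List String) :=
  let valid := geoids.filter (fun g => 5 ≤ PySem.Str.len g)
  let keys := PySem.List.dedup (valid.map pvKey)        -- dict.fromkeys(…): ordered dedup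
  keys.map (fun k => (k.1, k.2, valid.filter (fun g => pvKey g == k)))

-- ===== PRECONDITION & SPEC =====
def Spec_group_geoids_by_state_and_county_py (geoids : List String) (out : List (String × String × List String)) : Prop := out = group_geoids_by_state_and_county_py_alt geoids
instance (geoids : List String) (out : List (String × String × List String)) : Decidable (Spec_group_geoids_by_state_and_county_py geoids out) := by unfold Spec_group_geoids_by_state_and_county_py; infer_instance

-- ===== CLAIM (what is proved, stated in full; the proofs are below) =====
def Claim_equal_group_geoids_by_state_and_county_py : Prop := ∀ (geoids : List String), Dom_group_geoids_by_state_and_county_py geoids → Spec_group_geoids_by_state_and_county_py geoids (group_geoids_by_state_and_county_py geoids)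

-- ===== LEMMAS AND PROOFS =====

-- A's "create empty bucket if absent, then append" step is a single modify-with-default step
theorem pv_stepA_eq (d : PySem.Dict (String × String) (List String)) (g : String) :
    (let state_fips := PySem.Str.slice g none (some 2)
     let county_fips := PySem.Str.slice g (some 2) (some 5)
     let key := (state_fips, county_fips)
     let d' := if d.contains key then d else d.insert key ([] : List String)
     d'.modify key [] (fun v => v ++ [g])) = d.modify (pvKey g) [] (fun v => v ++ [g]) := by
  simp only [pvKey]
  by_cases h : d.contains (PySem.Str.slice g none (some 2), PySem.Str.slice g (some 2) (some 5))
  · simp [h]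
  · simp only [Bool.not_eq_true] at h
    simp [h, PySem.Dict.modify, PySem.Dict.getD_insert_self, PySem.Dict.insert_insert_self,
      PySem.Dict.getD_of_not_contains]

-- A's guarded loop over geoids is the modify loop over the length-filtered key/geoid pairs
theorem pv_foldA_eq (geoids : List String) (d : PySem.Dict (String × String) (List String)) :
    geoids.foldl (fun d geoid =>
      if 5 ≤ PySem.Str.len geoid then
        let state_fips := PySem.Str.slice geoid none (some 2)
        let county_fips := PySem.Str.slice geoid (some 2) (some 5)
        let key := (state_fips, county_fips)
        let d := if d.contains key then d else d.insert key ([] : List String)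
        d.modify key [] (fun v => v ++ [geoid])
      else d) d
    = ((geoids.filter (fun g => 5 ≤ PySem.Str.len g)).map (fun g => (pvKey g, g))).foldl
        (fun d p => d.modify p.1 [] (fun v => v ++ [p.2])) d := by
  induction geoids generalizing d with
  | nil => rfl
  | cons g gs ih =>
    rw [List.foldl_cons, ih, List.filter_cons]
    by_cases h : 5 ≤ PySem.Str.len g
    · rw [if_pos (decide_eq_true h), List.map_cons, List.foldl_cons]
      rw [if_pos h, pv_stepA_eq d g]
    · rw [if_neg (show ¬(decide (5 ≤ PySem.Str.len g) = true) by simpa using h)]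
      rw [if_neg h]

theorem group_geoids_main (geoids : List String) :
    group_geoids_by_state_and_county_py geoids = group_geoids_by_state_and_county_py_alt geoids := by
  simp only [group_geoids_by_state_and_county_py, group_geoids_by_state_and_county_py_alt]
  rw [pv_foldA_eq]
  set valid := geoids.filter (fun g => 5 ≤ PySem.Str.len g) with hvalid
  set l := valid.map (fun g => (pvKey g, g)) with hl
  set dd := l.foldl (fun d p => d.modify p.1 [] (fun v => v ++ [p.2]))
    (PySem.Dict.empty : PySem.Dict (String × String) (List String)) with hdd
  have hkeys : dd.keys = PySem.Set.ofList (valid.map pvKey) := by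
    rw [hdd, PySem.Dict.keys_foldl_modify_key l Prod.fst [] (fun _ p v => v ++ [p.2])]
    simp [hl, List.map_map, Function.comp_def, PySem.Set.update_nil_left]
  have hnd : dd.keys.Nodup := by
    rw [hkeys]; exact PySem.Set.nodup_ofList _
  have hget : ∀ k, dd.getD k [] = valid.filter (fun g => pvKey g == k) := by
    intro k
    rw [hdd, PySem.Dict.getD_foldl_modify_append l PySem.Dict.empty k]
    simp [hl, List.filter_map, List.map_map, Function.comp_def, PySem.Dict.getD_empty]
  rw [PySem.Dict.items_eq_map_keys dd hnd ([] : List String), hkeys, List.map_map]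
  have hded : PySem.List.dedup (valid.map pvKey) = PySem.Set.ofList (valid.map pvKey) := rfl
  rw [hded]
  refine List.map_congr_left ?_
  intro k _
  simp [hget k]

-- ===== VERDICT (by name: the statement is the Claim_ definition above) =====
theorem group_geoids_by_state_and_county_py_spec : Claim_equal_group_geoids_by_state_and_county_py := by
  intro geoids _
  unfold Spec_group_geoids_by_state_and_county_py
  exact group_geoids_main geoids
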